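-- pv_equiv track=rewrite | github.com/xile42/leetcode | python3/2645. 构造有效字符串的最少插入数.py | addMinimum
-- ===== SOURCE A (Python) =====
-- def addMinimum(word: str) -> int:
--
--     st = list()
--     ans = 0
--
--     for c in word:
--         if c == "a":
--             if not st:
--                 st.append(c)
--             else:
--                 ans += 3 - len(st)
--                 st = ["a"]
--         elif c == "b":
--             if not st:
--                 ans += 1
--                 st = ["a", "b"]
--             elif len(st) == 1:
--                 st.append(c)
--             else:
--                 ans += 3 - len(st) + 1
--                 st = ["a", "b"]
--         else:
--             ans += 2 - len(st)
--             st = list()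
--
--     ans += 3 - len(st) if st else 0
--
--     return ans
-- ===== SOURCE B (Python) =====
-- def addMinimum(word: str) -> int:
--     if not word:
--         return 0
--     r = [0 if c == "a" else 1 if c == "b" else 2 for c in word]
--     groups = 1 + sum(1 for x, y in zip(r, r[1:]) if y <= x)
--     return 3 * groups - len(word)
-- ===== Notes on version B (the rewrite author's own statement) =====
-- stated objective: simpler
-- what changed: Replaces A's stack simulation with per-case insertion accounting by a closed form: rank each char (a=0, b=1, other=2), count group boundaries where rank does not increase, and return 3*groups - len(word).
import Mathlib
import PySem

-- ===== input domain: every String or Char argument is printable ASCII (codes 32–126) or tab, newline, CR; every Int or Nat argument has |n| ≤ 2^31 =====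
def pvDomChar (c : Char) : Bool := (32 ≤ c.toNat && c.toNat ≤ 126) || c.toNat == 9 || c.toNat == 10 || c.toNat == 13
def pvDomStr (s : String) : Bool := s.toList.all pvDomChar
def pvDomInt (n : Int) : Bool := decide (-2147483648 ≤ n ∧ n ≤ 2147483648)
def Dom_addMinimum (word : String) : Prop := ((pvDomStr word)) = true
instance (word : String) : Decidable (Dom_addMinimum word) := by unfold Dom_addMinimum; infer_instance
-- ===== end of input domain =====

-- B replaces A's stack simulation by a closed form (count group boundaries, then 3*groups - n); same O(n) cost, simpler.

-- ===== PORT A =====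
-- the loop body of A, acting on (st, ans)
def stepA (s : List Char × Int) (c : Char) : List Char × Int :=
  let (st, ans) := s
  if c = 'a' then
    if st = [] then (st ++ [c], ans)
    else (['a'], ans + 3 - (st.length : Int))
  else if c = 'b' then
    if st = [] then (['a', 'b'], ans + 1)
    else if st.length = 1 then (st ++ [c], ans)
    else (['a', 'b'], ans + 3 - (st.length : Int) + 1)
  else ([], ans + 2 - (st.length : Int))

def addMinimum (word : String) : Int :=
  let res := word.toList.foldl stepA ([], 0)
  res.2 + (if res.1 ≠ [] then 3 - (res.1.length : Int) else 0)

-- ===== PORT B =====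
-- rank of a character: 0 for 'a', 1 for 'b', 2 for anything else (the comprehension in Source B)
def rank (c : Char) : Nat := if c = 'a' then 0 else if c = 'b' then 1 else 2

def addMinimum_alt (word : String) : Int :=
  match word.toList with
  | [] => 0
  | l@(_ :: _) =>
    let r := l.map rank
    let groups : Nat := 1 + (r.zip r.tail).countP (fun p => p.2 ≤ p.1)
    3 * (groups : Int) - (l.length : Int)

-- ===== PRECONDITION & SPEC =====
def Spec_addMinimum (word : String) (out : Int) : Prop := out = addMinimum_alt word
instance (word : String) (out : Int) : Decidable (Spec_addMinimum word out) := by unfold Spec_addMinimum; infer_instance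

-- ===== CLAIM (what is proved, stated in full; the proofs are below) =====
def Claim_equal_addMinimum : Prop := ∀ (word : String), Dom_addMinimum word → Spec_addMinimum word (addMinimum word)

-- ===== LEMMAS AND PROOFS =====

-- the stack A maintains, as a function of the rank of the last character seen
def stk (r : Nat) : List Char := if r = 0 then ['a'] else if r = 1 then ['a', 'b'] else []

-- pending cost of flushing the stack stk r
def pend (r : Nat) : Int := 2 - (r : Int)

-- boundary count starting from previous rank r
def cnt : Nat → List Char → Nat
  | _, [] => 0
  | r, c :: t => (if rank c ≤ r then 1 else 0) + cnt (rank c) t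

-- rank of the last character (or r if none)
def fin : Nat → List Char → Nat
  | r, [] => r
  | _, c :: t => fin (rank c) t

theorem rank_le_two (c : Char) : rank c ≤ 2 := by
  unfold rank; split_ifs <;> omega

theorem fin_le_two : ∀ (l : List Char) (r : Nat), r ≤ 2 → fin r l ≤ 2 := by
  intro l
  induction l with
  | nil => intro r h; exact h
  | cons c t ih => intro r h; exact ih (rank c) (rank_le_two c)

theorem stepA_eq (r : Nat) (hr : r ≤ 2) (ans : Int) (c : Char) :
    stepA (stk r, ans) c
      = (stk (rank c), ans + 3 * (if rank c ≤ r then 1 else 0) - 1 + pend r - pend (rank c)) := by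
  interval_cases r <;>
    by_cases h1 : c = 'a' <;>
      by_cases h2 : c = 'b' <;>
        simp_all [stepA, stk, rank, pend] <;> ring

theorem foldA_eq : ∀ (l : List Char) (r : Nat), r ≤ 2 → ∀ (ans : Int),
    l.foldl stepA (stk r, ans)
      = (stk (fin r l),
         ans + 3 * (cnt r l : Int) - (l.length : Int) + pend r - pend (fin r l)) := by
  intro l
  induction l with
  | nil => intro r hr ans; simp [cnt, fin]
  | cons c t ih =>
    intro r hr ans
    rw [List.foldl_cons, stepA_eq r hr ans c, ih (rank c) (rank_le_two c)]
    have : (cnt r (c :: t) : Int)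
        = (if rank c ≤ r then 1 else 0) + (cnt (rank c) t : Int) := by
      rw [show cnt r (c :: t) = (if rank c ≤ r then 1 else 0) + cnt (rank c) t from rfl]
      push_cast
      split_ifs <;> ring
    simp only [fin, List.length_cons, this]
    refine Prod.ext rfl ?_
    push_cast
    split_ifs <;> ring

theorem cnt_zip : ∀ (t : List Char) (c : Char),
    cnt (rank c) t
      = (((c :: t).map rank).zip ((c :: t).map rank).tail).countP (fun p => p.2 ≤ p.1) := by
  intro t
  induction t with
  | nil => intro c; simp [cnt]
  | cons d t' ih =>
    intro c
    have := ih d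
    simp only [List.map_cons, List.tail_cons, List.zip_cons_cons, List.countP_cons] at *
    simp [cnt, this]
    split_ifs <;> simp_all <;> omega

-- ===== VERDICT (by name: the statement is the Claim_ definition above) =====
theorem final_list (c : Char) (t : List Char) :
    ((c :: t).foldl stepA ([], 0)).2
      + (if ((c :: t).foldl stepA ([], 0)).1 ≠ [] then 3 - ((((c :: t).foldl stepA ([], 0)).1.length : Int)) else 0)
    = 3 * ((1 + (((c :: t).map rank).zip ((c :: t).map rank).tail).countP (fun p => p.2 ≤ p.1) : Nat) : Int)
      - ((c :: t).length : Int) := by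
  have h0 : (([] : List Char), (0 : Int)) = (stk 2, 0) := by simp [stk]
  rw [h0, foldA_eq (c :: t) 2 (by omega) 0]
  have hcnt : cnt 2 (c :: t) = 1 + cnt (rank c) t := by simp [cnt, rank_le_two c]
  rw [cnt_zip t c] at hcnt
  have hfin := fin_le_two (c :: t) 2 (by omega)
  interval_cases hf : fin 2 (c :: t) <;> simp [stk, pend, hcnt]

theorem addMinimum_spec : Claim_equal_addMinimum := by
  intro word _
  unfold Spec_addMinimum addMinimum addMinimum_alt
  cases h : word.toList with
  | nil => simp
  | cons c t => exact final_list c t
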